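-- pv_equiv track=rewrite | github.com/aimasteracc/tree-sitter-analyzer | tests/format_testing/format_contract_tests.py | _validate_csv_parameters
-- ===== SOURCE A (Python) =====
-- def _validate_csv_parameters(parameters: str) -> bool:
--     """Validate CSV parameter encoding format"""
--     if not parameters.strip():
--         return True
--
--     # Should be param1:type1;param2:type2 format
--     params = parameters.split(";")
--
--     for param in params:
--         param = param.strip()
--         if ":" not in param:
--             return False
--
--         parts = param.split(":")
--         if len(parts) != 2:
--             return False
--
--         name, type_name = parts
--         if not name.strip() or not type_name.strip():
--             return False
--
--     return True
-- ===== SOURCE B (Python) =====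
-- def _validate_csv_parameters(parameters: str) -> bool:
--     """Validate CSV parameter encoding format"""
--     # Single left-to-right scan with a 4-state machine; no splitting.
--     state = 0  # 0: before name, 1: inside/after name, 2: before type, 3: inside/after type
--     seen = False  # any non-whitespace character seen at all
--     for ch in parameters:
--         if ch == ';':
--             if state != 3:
--                 return False
--             state = 0
--             seen = True
--         elif ch == ':':
--             if state != 1:
--                 return False
--             state = 2
--             seen = True
--         elif not ch.isspace():
--             if state == 0:
--                 state = 1
--             elif state == 2:
--                 state = 3
--             seen = True
--     if not seen:
--         return True
--     return state == 3
-- ===== Notes on version B (the rewrite author's own statement) =====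
-- stated objective: alternative
-- what changed: Replaces splitting the string into segments, stripping each and splitting again on the separator with a single left-to-right character scan driving a 4-state machine (before-name / in-name / before-type / in-type) plus a seen-non-whitespace flag.
import Mathlib
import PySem

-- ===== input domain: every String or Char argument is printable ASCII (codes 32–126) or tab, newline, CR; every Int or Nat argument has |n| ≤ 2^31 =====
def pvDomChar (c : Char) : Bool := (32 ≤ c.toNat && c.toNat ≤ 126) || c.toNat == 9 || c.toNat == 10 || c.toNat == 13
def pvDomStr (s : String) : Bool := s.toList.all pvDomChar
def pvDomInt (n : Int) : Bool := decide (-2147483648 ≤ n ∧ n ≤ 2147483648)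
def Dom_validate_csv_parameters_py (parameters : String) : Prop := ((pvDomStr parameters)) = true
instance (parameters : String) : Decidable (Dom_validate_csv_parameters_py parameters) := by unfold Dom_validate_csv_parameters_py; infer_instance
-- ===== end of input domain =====

-- B replaces A's split-on-';' / strip / split-on-':' segment checking by a single
-- left-to-right character scan driving a 4-state machine (alternative decomposition, same cost).

-- ===== PORT A =====
-- the `for param in params` loop with its early `return False`s
def aloop : List String → Bool
  | [] => true
  | p :: rest =>
    let param := PySem.Str.strip p
    if PySem.Str.isIn ":" param = false then false
    else
      match PySem.Str.split? param ":" with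
      | none => false
      | some parts =>
        if parts.length ≠ 2 then false
        else
          match parts with
          | [name, type_name] =>
            if PySem.Str.strip name = "" || PySem.Str.strip type_name = "" then false
            else aloop rest
          | _ => false

def validate_csv_parameters_py (parameters : String) : Bool :=
  if PySem.Str.strip parameters = "" then true
  else
    match PySem.Str.split? parameters ";" with
    | none => false
    | some params => aloop params

-- ===== PORT B =====
-- the `for ch in parameters` scan: state ∈ {0,1,2,3}, seen = non-whitespace seen so far
def altGo : List Char → Nat → Bool → Bool
  | [], st, seen => if seen = false then true else st == 3
  | c :: rest, st, seen =>
    if c = ';' then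
      if st ≠ 3 then false else altGo rest 0 true
    else if c = ':' then
      if st ≠ 1 then false else altGo rest 2 true
    else if PySem.Chars.isspace c = false then
      altGo rest (if st = 0 then 1 else if st = 2 then 3 else st) true
    else
      altGo rest st seen

def validate_csv_parameters_py_alt (parameters : String) : Bool :=
  altGo parameters.toList 0 false

-- ===== PRECONDITION & SPEC =====
def Spec_validate_csv_parameters_py (parameters : String) (out : Bool) : Prop := out = validate_csv_parameters_py_alt parameters
instance (parameters : String) (out : Bool) : Decidable (Spec_validate_csv_parameters_py parameters out) := by unfold Spec_validate_csv_parameters_py; infer_instance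

-- ===== CLAIM (what is proved, stated in full; the proofs are below) =====
def Claim_equal_validate_csv_parameters_py : Prop := ∀ (parameters : String), Dom_validate_csv_parameters_py parameters → Spec_validate_csv_parameters_py parameters (validate_csv_parameters_py parameters)

-- ===== LEMMAS AND PROOFS =====

def splitCh1 (sep : Char) : List Char → List Char × List (List Char)
  | [] => ([], [])
  | c :: rest =>
    let p := splitCh1 sep rest
    if c = sep then ([], p.1 :: p.2) else (c :: p.1, p.2)

theorem splitOn_go_eq' (sep : Char) : ∀ (fuel : Nat) (l cur : List Char) (acc : List (List Char)) (_ : l.length < fuel),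
    PySem.Chars.splitOn.go [sep] fuel l cur acc
      = acc.reverse ++ (cur.reverse ++ (splitCh1 sep l).1) :: (splitCh1 sep l).2 := by
  intro fuel
  induction fuel with
  | zero => intro l cur acc h; omega
  | succ n ih =>
    intro l cur acc h
    match l with
    | [] => simp [PySem.Chars.splitOn.go, splitCh1]
    | c :: rest =>
      rw [PySem.Chars.splitOn.go]
      simp only [List.length_cons] at h
      by_cases hc : c = sep
      · have hp : List.isPrefixOf [sep] (c :: rest) = true := by simp [List.isPrefixOf, hc]
        rw [if_pos hp]
        simp only [List.length_cons, List.drop_succ_cons, List.length_nil, List.drop_zero]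
        rw [ih _ _ _ (by omega)]
        simp [splitCh1, hc]
      · have hp : List.isPrefixOf [sep] (c :: rest) = false := by
          simp [List.isPrefixOf]; exact fun h => absurd h.symm hc
        rw [if_neg (by simp [hp])]
        rw [ih _ _ _ (by omega)]
        simp [splitCh1, hc]

theorem splitOn_single (sep : Char) (l : List Char) :
    PySem.Chars.splitOn l [sep] = (splitCh1 sep l).1 :: (splitCh1 sep l).2 := by
  rw [PySem.Chars.splitOn, splitOn_go_eq' sep _ _ _ _ (by omega)]
  simp

def stepSeg (st : Nat) (c : Char) : Option Nat :=
  if c = ':' then (if st = 1 then some 2 else none)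
  else if PySem.Chars.isspace c then some st
  else some (if st = 0 then 1 else if st = 2 then 3 else st)

def run : Nat → List Char → Option Nat
  | st, [] => some st
  | st, c :: rest =>
    match stepSeg st c with
    | some st' => run st' rest
    | none => none

def runOK (st : Nat) (seg : List Char) : Bool := run st seg == some 3
def good (seg : List Char) : Bool := runOK 0 seg
def nonws (c : Char) : Bool := !PySem.Chars.isspace c
def hasNW (l : List Char) : Bool := !(l.filter nonws).isEmpty

def core : Nat → List Char → Bool
  | st, [] => st == 3
  | st, c :: rest =>
    if c = ';' then (st == 3) && core 0 rest
    else
      match stepSeg st c with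
      | some st' => core st' rest
      | none => false

theorem altGo_true : ∀ (cs : List Char) (st : Nat), altGo cs st true = core st cs := by
  intro cs
  induction cs with
  | nil => intro st; simp [altGo, core]
  | cons c rest ih =>
    intro st
    by_cases h1 : c = ';'
    · subst h1
      simp only [altGo, core, if_pos rfl, ih]
      by_cases h : st = 3 <;> simp [h]
    · by_cases h2 : c = ':'
      · subst h2
        simp only [altGo, core, stepSeg, if_neg h1, if_pos rfl, ih]
        by_cases h : st = 1 <;> simp [h, ih]
      · by_cases h3 : PySem.Chars.isspace c = false
        · simp [altGo, core, stepSeg, h1, h2, h3, ih]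
        · simp only [Bool.not_eq_false] at h3
          simp [altGo, core, stepSeg, h1, h2, h3, ih]

theorem altGo_false : ∀ (cs : List Char) (st : Nat),
    altGo cs st false = if cs.all PySem.Chars.isspace then true else core st cs := by
  intro cs
  induction cs with
  | nil => intro st; simp [altGo]
  | cons c rest ih =>
    intro st
    by_cases h1 : c = ';'
    · subst h1
      have : PySem.Chars.isspace ';' = false := by decide
      simp only [altGo, core, if_pos rfl, List.all_cons, this, Bool.false_and, if_neg (Bool.false_ne_true), altGo_true]
      by_cases h : st = 3 <;> simp [h]
    · by_cases h2 : c = ':'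
      · subst h2
        have : PySem.Chars.isspace ':' = false := by decide
        simp only [altGo, core, stepSeg, if_neg h1, if_pos rfl, List.all_cons, this,
          Bool.false_and, if_neg (Bool.false_ne_true), altGo_true]
        by_cases h : st = 1 <;> simp [h, altGo_true]
      · by_cases h3 : PySem.Chars.isspace c = false
        · simp [altGo, core, stepSeg, h1, h2, h3, altGo_true]
        · simp only [Bool.not_eq_false] at h3
          simp [altGo, core, stepSeg, h1, h2, h3, ih]

theorem core_split : ∀ (cs : List Char) (st : Nat),
    core st cs = (runOK st (splitCh1 ';' cs).1 && ((splitCh1 ';' cs).2).all good) := by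
  intro cs
  induction cs with
  | nil => intro st; simp [core, splitCh1, runOK, run]
  | cons c rest ih =>
    intro st
    by_cases h1 : c = ';'
    · subst h1
      simp only [core, if_pos rfl, splitCh1, runOK, run, ih 0]
      by_cases h : st = 3 <;> simp [h, good, runOK, run, Bool.and_assoc]
    · simp only [core, if_neg h1, splitCh1, if_neg h1, runOK, run]
      cases hs : stepSeg st c with
      | none => simp
      | some st' => simpa [runOK] using ih st'

theorem splitCh1_not_mem {sep : Char} : ∀ {l : List Char}, sep ∉ l → splitCh1 sep l = (l, []) := by
  intro l
  induction l with
  | nil => intro _; rfl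
  | cons c rest ih =>
    intro h
    simp only [List.mem_cons, not_or] at h
    simp [splitCh1, Ne.symm h.1, ih h.2]

theorem splitCh1_snd_nil {sep : Char} : ∀ {l : List Char}, (splitCh1 sep l).2 = [] → sep ∉ l := by
  intro l
  induction l with
  | nil => intro _; simp
  | cons c rest ih =>
    intro h
    by_cases hc : c = sep
    · simp [splitCh1, hc] at h
    · simp only [splitCh1, if_neg hc] at h
      simp only [List.mem_cons, not_or]
      exact ⟨fun he => hc he.symm, ih h⟩

theorem splitCh1_fst_of_snd_nil {sep : Char} : ∀ {l : List Char}, (splitCh1 sep l).2 = [] → (splitCh1 sep l).1 = l := by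
  intro l h
  rw [splitCh1_not_mem (splitCh1_snd_nil h)]

theorem runType : ∀ (seg : List Char) (st : Nat), st = 2 ∨ st = 3 →
    (run st seg == some 3) = (!(seg.contains ':') && ((st == 3) || hasNW seg)) := by
  intro seg
  induction seg with
  | nil =>
    intro st h
    rcases h with h | h <;> subst h <;> simp [run, hasNW]
  | cons c rest ih =>
    intro st h
    by_cases hc : c = ':'
    · subst hc
      have hst : st ≠ 1 := by rcases h with h | h <;> omega
      simp [run, stepSeg, hst]
    · by_cases hw : PySem.Chars.isspace c
      · have hnw : nonws c = false := by simp [nonws, hw]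
        have hbc : (':' == c) = false := by simp; exact fun h' => absurd h'.symm hc
        have hd : decide (':' = c) = false := by simp; exact fun h' => absurd h'.symm hc
        simp [run, stepSeg, if_neg hc, if_pos hw, ih st h, List.contains_cons, hasNW,
          List.filter_cons, hnw, hbc, hd]
      · rw [Bool.not_eq_true] at hw
        have hnw : nonws c = true := by simp [nonws, hw]
        have h3 : (if st = 0 then 1 else if st = 2 then 3 else st) = 3 := by
          rcases h with h | h <;> simp [h]
        have hbc : (':' == c) = false := by simp; exact fun h' => absurd h'.symm hc
        simp [run, stepSeg, if_neg hc, hw, h3,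
          ih 3 (Or.inr rfl), List.contains_cons, hasNW, List.filter_cons, hnw, hbc]
        exact fun _ h' => absurd h'.symm hc

def nameTail (st : Nat) (n : List Char) : List (List Char) → Bool
  | [t] => ((st == 1) || hasNW n) && hasNW t
  | _ => false

theorem runName : ∀ (seg : List Char) (st : Nat), st = 0 ∨ st = 1 →
    (run st seg == some 3) = nameTail st (splitCh1 ':' seg).1 (splitCh1 ':' seg).2 := by
  intro seg
  induction seg with
  | nil =>
    intro st h
    rcases h with h | h <;> subst h <;> simp [run, splitCh1, nameTail]
  | cons c rest ih =>
    intro st h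
    by_cases hc : c = ':'
    · subst hc
      simp only [splitCh1, if_pos rfl]
      cases ht : (splitCh1 ':' rest).2 with
      | nil =>
        have hmem := splitCh1_snd_nil ht
        have hfst := splitCh1_fst_of_snd_nil ht
        have hcon : rest.contains ':' = false := by simpa using hmem
        by_cases h1 : st = 1
        · simp [run, stepSeg, h1, runType rest 2 (Or.inl rfl), nameTail, hfst]
          exact fun _ => hmem
        · have h0 : st = 0 := by rcases h with h | h; exact h; exact absurd h h1
          simp [run, stepSeg, h0, nameTail, hfst]
          intro hx; simp [hasNW] at hx
      | cons t ts =>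
        have hmem : ':' ∈ rest := by
          by_contra hn
          rw [splitCh1_not_mem hn] at ht; simp at ht
        have hcon : rest.contains ':' = true := by simpa using hmem
        by_cases h1 : st = 1
        · have hrt := runType rest 2 (Or.inl rfl)
          cases ts <;> simp [run, stepSeg, h1, hrt, hcon, nameTail] <;>
            exact fun hx => absurd hmem hx
        · simp only [run, stepSeg, if_pos rfl, if_neg h1]
          cases ts <;> simp [nameTail]
    · by_cases hw : PySem.Chars.isspace c
      · have hnw : nonws c = false := by simp [nonws, hw]
        simp only [run, stepSeg, if_neg hc, if_pos hw, ih st h, splitCh1, if_neg hc]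
        cases ht : (splitCh1 ':' rest).2 with
        | nil => simp [nameTail]
        | cons t ts =>
          cases ts <;> simp [nameTail, hasNW, List.filter_cons, hnw]
      · rw [Bool.not_eq_true] at hw
        have hnw : nonws c = true := by simp [nonws, hw]
        have hb : (if st = 0 then 1 else if st = 2 then 3 else st) = 1 := by
          rcases h with h | h <;> simp [h]
        simp only [run, stepSeg, if_neg hc, hw, if_neg (Bool.false_ne_true), hb,
          ih 1 (Or.inr rfl), splitCh1, if_neg hc]
        cases ht : (splitCh1 ':' rest).2 with
        | nil => simp [nameTail]
        | cons t ts =>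
          cases ts <;> simp [nameTail, hasNW, List.filter_cons, hnw]

theorem filter_dropWhile_isspace (l : List Char) :
    List.filter nonws (List.dropWhile PySem.Chars.isspace l) = List.filter nonws l := by
  induction l with
  | nil => rfl
  | cons c rest ih =>
    by_cases hw : PySem.Chars.isspace c
    · have hnw : nonws c = false := by simp [nonws, hw]
      simp [List.dropWhile_cons, hw, List.filter_cons, hnw, ih]
    · rw [Bool.not_eq_true] at hw
      simp [List.dropWhile_cons, hw]

theorem filter_strip (l : List Char) :
    List.filter nonws (PySem.Chars.strip l) = List.filter nonws l := by
  rw [PySem.Chars.strip, PySem.Chars.rstrip, PySem.Chars.lstrip]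
  rw [List.filter_reverse, filter_dropWhile_isspace, List.filter_reverse,
    List.reverse_reverse, filter_dropWhile_isspace]

theorem strip_eq_nil_iff (l : List Char) :
    PySem.Chars.strip l = [] ↔ List.filter nonws l = [] := by
  constructor
  · intro h
    rw [← filter_strip, h]; rfl
  · intro h
    have hall : ∀ c ∈ l, PySem.Chars.isspace c = true := by
      intro c hc
      by_contra hn
      rw [Bool.not_eq_true] at hn
      have : c ∈ List.filter nonws l := by
        rw [List.mem_filter]; exact ⟨hc, by simp [nonws, hn]⟩
      rw [h] at this; simp at this
    have h1 : PySem.Chars.lstrip l = [] := by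
      rw [PySem.Chars.lstrip, List.dropWhile_eq_nil_iff]; exact hall
    rw [PySem.Chars.strip, h1]
    rfl

theorem splitCh1_filter {p : Char → Bool} {sep : Char} (hp : p sep = true) : ∀ (l : List Char),
    splitCh1 sep (List.filter p l)
      = (List.filter p (splitCh1 sep l).1, ((splitCh1 sep l).2).map (List.filter p)) := by
  intro l
  induction l with
  | nil => rfl
  | cons c rest ih =>
    by_cases hc : c = sep
    · subst hc
      simp [List.filter_cons, hp, splitCh1, ih]
    · by_cases hpc : p c = true
      · simp [List.filter_cons, hpc, splitCh1, hc, ih]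
      · rw [Bool.not_eq_true] at hpc
        simp [List.filter_cons, hpc, splitCh1, hc, ih]

theorem isIn_colon (p : List Char) : PySem.Chars.isIn [':'] p = decide (':' ∈ p) := by
  by_cases hm : ':' ∈ p
  · simp only [hm, decide_true]
    rw [PySem.Chars.isIn_iff_infix]
    obtain ⟨s, t, rfl⟩ := List.append_of_mem hm
    exact ⟨s, t, by simp⟩
  · simp only [hm, decide_false]
    rw [PySem.Chars.isIn_eq_false_iff]
    intro hinf
    exact hm (hinf.subset (by simp))

def checkSeg (seg : List Char) : Bool :=
  if PySem.Chars.isIn [':'] (PySem.Chars.strip seg) = false then false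
  else if (PySem.Chars.splitOn (PySem.Chars.strip seg) [':']).length ≠ 2 then false
  else
    match PySem.Chars.splitOn (PySem.Chars.strip seg) [':'] with
    | [n, t] => !((PySem.Chars.strip n) = []) && !((PySem.Chars.strip t) = [])
    | _ => false

theorem nameTail_two (st : Nat) (n t t2 : List Char) (r : List (List Char)) :
    nameTail st n (t :: t2 :: r) = false := rfl

theorem checkSeg_eq_good (seg : List Char) : checkSeg seg = good seg := by
  have hcolon : nonws ':' = true := by decide
  have hsplit_p := splitCh1_filter hcolon (PySem.Chars.strip seg)
  have hsplit_s := splitCh1_filter hcolon seg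
  rw [filter_strip seg] at hsplit_p
  have heq := hsplit_p.symm.trans hsplit_s
  have hfst : List.filter nonws (splitCh1 ':' (PySem.Chars.strip seg)).1
      = List.filter nonws (splitCh1 ':' seg).1 := congrArg Prod.fst heq
  have hsnd : ((splitCh1 ':' (PySem.Chars.strip seg)).2).map (List.filter nonws)
      = ((splitCh1 ':' seg).2).map (List.filter nonws) := congrArg Prod.snd heq
  have hlen : ((splitCh1 ':' (PySem.Chars.strip seg)).2).length = ((splitCh1 ':' seg).2).length := by
    have := congrArg List.length hsnd
    simpa using this
  unfold checkSeg good runOK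
  rw [runName seg 0 (Or.inl rfl), splitOn_single, isIn_colon]
  by_cases hm : ':' ∈ seg
  · have hmf : ':' ∈ List.filter nonws seg := List.mem_filter.mpr ⟨hm, hcolon⟩
    have hmp : ':' ∈ PySem.Chars.strip seg := by
      rw [← filter_strip seg] at hmf
      exact List.mem_of_mem_filter hmf
    simp only [hmp, decide_true, Bool.true_eq_false, if_false]
    cases hts0 : (splitCh1 ':' (PySem.Chars.strip seg)).2 with
    | nil => exact absurd (splitCh1_snd_nil hts0) (by simpa using hmp)
    | cons t0 ts0' =>
      cases ts0' with
      | cons x xs =>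
        -- at least three parts on the strip side; same length on the seg side
        rw [hts0] at hlen
        simp only [List.length_cons] at hlen
        cases hts : (splitCh1 ':' seg).2 with
        | nil => rw [hts] at hlen; simp at hlen
        | cons a tl =>
          cases tl with
          | nil => rw [hts] at hlen; simp at hlen
          | cons b r =>
            rw [nameTail_two]
            simp
      | nil =>
        -- exactly two parts
        rw [hts0] at hlen hsnd
        simp only [List.length_cons, List.length_nil] at hlen
        cases hts : (splitCh1 ':' seg).2 with
        | nil => rw [hts] at hlen; simp at hlen
        | cons t tl =>
          cases tl with
          | cons b r => rw [hts] at hlen; simp at hlen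
          | nil =>
            rw [hts] at hsnd
            simp only [List.map_cons, List.map_nil, List.cons.injEq] at hsnd
            have hft : List.filter nonws t0 = List.filter nonws t := hsnd.1
            simp only [List.length_cons, List.length_nil]
            rw [if_neg (by omega)]
            show (!(PySem.Chars.strip (splitCh1 ':' (PySem.Chars.strip seg)).1 = []) &&
                  !(PySem.Chars.strip t0 = [])) = nameTail 0 (splitCh1 ':' seg).1 [t]
            have e1 : (PySem.Chars.strip (splitCh1 ':' (PySem.Chars.strip seg)).1 = [])
                ↔ ((List.filter nonws (splitCh1 ':' seg).1).isEmpty = true) := by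
              rw [strip_eq_nil_iff, hfst, List.isEmpty_iff]
            have e2 : (PySem.Chars.strip t0 = [])
                ↔ ((List.filter nonws t).isEmpty = true) := by
              rw [strip_eq_nil_iff, hft, List.isEmpty_iff]
            simp only [nameTail, hasNW]
            rw [Bool.eq_iff_iff]
            simp [e1, e2, List.isEmpty_iff]
  · have hmp : ':' ∉ PySem.Chars.strip seg := by
      intro hx
      have : ':' ∈ List.filter nonws (PySem.Chars.strip seg) := List.mem_filter.mpr ⟨hx, hcolon⟩
      rw [filter_strip seg] at this
      exact hm (List.mem_of_mem_filter this)
    have hts : (splitCh1 ':' seg).2 = [] := by rw [splitCh1_not_mem hm]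
    rw [hts]
    simp [hmp, nameTail]

theorem str_eq_empty_iff (s : String) : s = "" ↔ s.toList = [] := by
  constructor
  · intro h; rw [h]; rfl
  · intro h
    have := congrArg String.ofList h
    simpa using this

theorem aloop_eq : ∀ ps : List String, aloop ps = (ps.map String.toList).all checkSeg := by
  intro ps
  induction ps with
  | nil => rfl
  | cons p rest ih =>
    simp only [List.map_cons, List.all_cons, ← ih]
    rw [aloop]
    obtain ⟨parts, hsp, hmap⟩ : ∃ parts, PySem.Str.split? (PySem.Str.strip p) ":" = some parts ∧
        parts.map String.toList = PySem.Chars.splitOn (PySem.Chars.strip p.toList) [':'] := by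
      have h := PySem.Str.split?_map (PySem.Str.strip p) ":"
      rw [PySem.Chars.split?] at h
      cases hq : PySem.Str.split? (PySem.Str.strip p) ":" with
      | none => rw [hq] at h; simp at h
      | some parts =>
        rw [hq] at h
        simp only [Option.map_some, Option.some.injEq] at h ⊢
        refine ⟨parts, rfl, ?_⟩
        rw [show (":" : String).toList = [':'] from rfl] at h
        simp only [List.isEmpty_cons, Bool.false_eq_true, if_false] at h
        rw [← PySem.Str.toList_strip p]
        exact Option.some.inj h
    have hin : PySem.Str.isIn ":" (PySem.Str.strip p)
        = PySem.Chars.isIn [':'] (PySem.Chars.strip p.toList) := by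
      rw [PySem.Str.isIn, PySem.Str.toList_strip]; rfl
    simp only [hsp, hin]
    unfold checkSeg
    rw [← hmap]
    by_cases hI : PySem.Chars.isIn [':'] (PySem.Chars.strip p.toList) = false
    · simp [hI]
    · rw [if_neg hI, if_neg hI]
      simp only [List.length_map]
      by_cases hl : parts.length = 2
      · match parts, hl with
        | [n, t], _ =>
          simp only [List.length_cons, List.length_nil, List.map_cons, List.map_nil]
          have hlen2 : ¬((0:Nat)+1+1 ≠ 2) := by omega
          rw [if_neg hlen2, if_neg hlen2]
          have e1 : (PySem.Str.strip n = "") = (PySem.Chars.strip n.toList = []) := by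
            rw [eq_iff_iff, str_eq_empty_iff, PySem.Str.toList_strip]
          have e2 : (PySem.Str.strip t = "") = (PySem.Chars.strip t.toList = []) := by
            rw [eq_iff_iff, str_eq_empty_iff, PySem.Str.toList_strip]
          by_cases a1 : PySem.Chars.strip n.toList = [] <;>
            by_cases a2 : PySem.Chars.strip t.toList = [] <;> simp [e1, e2, a1, a2]
      · rw [if_pos (by omega), if_pos (by omega), Bool.false_and]

theorem split?_char (s : String) (c : Char) (sep : String) (hsep : sep.toList = [c]) :
    ∃ parts, PySem.Str.split? s sep = some parts ∧
      parts.map String.toList = PySem.Chars.splitOn s.toList [c] := by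
  have h := PySem.Str.split?_map s sep
  rw [PySem.Chars.split?, hsep] at h
  cases hq : PySem.Str.split? s sep with
  | none => rw [hq] at h; simp at h
  | some parts =>
    rw [hq] at h
    simp only [Option.map_some, Option.some.injEq, List.isEmpty_cons, Bool.false_eq_true,
      if_false] at h
    exact ⟨parts, rfl, h⟩

theorem main_eq (parameters : String) :
    validate_csv_parameters_py parameters = validate_csv_parameters_py_alt parameters := by
  rw [validate_csv_parameters_py_alt, altGo_false, validate_csv_parameters_py]
  have hstrip : (PySem.Str.strip parameters = "") ↔ parameters.toList.all PySem.Chars.isspace = true := by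
    rw [str_eq_empty_iff, PySem.Str.toList_strip, strip_eq_nil_iff, List.filter_eq_nil_iff,
      List.all_eq_true]
    constructor
    · intro h c hc
      have := h c hc
      simpa [nonws] using this
    · intro h c hc
      simp [nonws, h c hc]
  by_cases hb : parameters.toList.all PySem.Chars.isspace = true
  · rw [if_pos (hstrip.mpr hb), if_pos hb]
  · rw [if_neg (fun hx => hb (hstrip.mp hx)), if_neg hb]
    obtain ⟨params, hsp, hmap⟩ := split?_char parameters ';' ";" rfl
    rw [hsp]
    show aloop params = core 0 parameters.toList
    rw [aloop_eq, hmap, splitOn_single]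
    have hfun : checkSeg = good := funext checkSeg_eq_good
    rw [hfun, List.all_cons, core_split]
    rfl

-- ===== VERDICT (by name: the statement is the Claim_ definition above) =====
theorem validate_csv_parameters_py_spec : Claim_equal_validate_csv_parameters_py := by
  intro parameters _
  exact main_eq parameters
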